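-- pv_equiv track=rewrite | github.com/docToolchain/aoc-2020 | day06/python/t-pi/solution.py | get_groups_answers
-- ===== SOURCE A (Python) =====
-- def get_groups_answers(answers_list, star = 2):
--     ''' Collect answers of a passenger batch and return sum
--         star = 1: Collect any answer from any group's passenger
--         star = 2: Collect only answers that are in all passengers' answers
--     '''
--     group_answers = list()
--     found_answers = list()
--     answers_sum = 0
--     group_answer_sum = 0
--     for line in answers_list:
--         if (len(line) == 0):
--             answers_sum += len(found_answers)
--             group_answer_sum += len(group_answers)
--             found_answers = list()
--             group_answers = list()
--             continue
--         if (len(found_answers) == 0):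
--             group_answers = list(line)
--         # star == 1
--         for letter in line:
--             if (letter not in found_answers):
--                 found_answers.append(letter)
--         # star == 2
--         pop_me = list()
--         for letter in group_answers:
--             if (letter not in line):
--                 pop_me.append(letter)
--         for pop_letter in pop_me:
--             group_answers.pop(group_answers.index(pop_letter))
--     if (len(found_answers) > 0):
--         answers_sum += len(found_answers)
--         found_answers = list()
--     if (len(group_answers) > 0):
--         group_answer_sum += len(group_answers)
--         group_answer = list()
--     if (star == 1):
--         return answers_sum
--     return group_answer_sum
-- ===== SOURCE B (Python) =====
-- def get_groups_answers(answers_list, star = 2):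
--     ''' Partition into groups of consecutive non-empty lines, then compute
--         both totals per group in closed form and select by star. '''
--     groups = []
--     current = []
--     for line in answers_list:
--         if line:
--             current.append(line)
--         else:
--             if current:
--                 groups.append(current)
--             current = []
--     if current:
--         groups.append(current)
--     any_total = sum(len(set("".join(g))) for g in groups)
--     all_total = sum(sum(1 for c in g[0] if all(c in l for l in g)) for g in groups)
--     return any_total if star == 1 else all_total
-- ===== Notes on version B (the rewrite author's own statement) =====
-- stated objective: simpler
-- what changed: Replaces A's streaming loop that hand-maintains a dedup list and a multiset intersection with pop/index bookkeeping by a partition into groups followed by per-group closed-form counts (set of the joined lines for 'any'; count of first-line chars contained in every line for 'all').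
import Mathlib
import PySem

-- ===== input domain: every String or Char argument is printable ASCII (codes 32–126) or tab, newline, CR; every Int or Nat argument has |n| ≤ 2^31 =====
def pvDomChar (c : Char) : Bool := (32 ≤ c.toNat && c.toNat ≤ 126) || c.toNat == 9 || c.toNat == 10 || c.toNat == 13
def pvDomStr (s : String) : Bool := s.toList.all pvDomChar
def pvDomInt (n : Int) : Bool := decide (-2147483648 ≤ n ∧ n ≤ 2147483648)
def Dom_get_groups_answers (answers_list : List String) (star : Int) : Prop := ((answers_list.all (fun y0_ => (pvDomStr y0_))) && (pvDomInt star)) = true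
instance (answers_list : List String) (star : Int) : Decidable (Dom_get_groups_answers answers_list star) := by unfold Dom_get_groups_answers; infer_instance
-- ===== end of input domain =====

-- B partitions the input into groups of consecutive non-empty lines and computes both
-- totals per group in closed form, instead of A's streaming dedup/intersection loop (objective: simpler).


-- ===== PORT A =====
-- one loop iteration of A; `letter in line` on a 1-char string is exactly char membership in line's chars
def pvAStep (st : List Char × List Char × Int × Int) (line : String) : List Char × List Char × Int × Int :=
  let ga := st.1
  let fa := st.2.1
  let asum := st.2.2.1
  let gsum := st.2.2.2
  if line.toList.length = 0 then
    ([], [], asum + fa.length, gsum + ga.length)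
  else
    let ga := if fa.length = 0 then line.toList else ga
    let fa := line.toList.foldl (fun fa letter => if letter ∈ fa then fa else fa ++ [letter]) fa
    let pop_me := ga.foldl (fun pm letter => if letter ∈ line.toList then pm else pm ++ [letter]) ([] : List Char)
    let ga := pop_me.foldl (fun g p =>
        match PySem.List.index? g p with
        | some i =>
          match PySem.List.pop? g (Int.ofNat i) with
          | some pr => pr.2
          | none => g
        | none => g) ga
    (ga, fa, asum, gsum)

def get_groups_answers (answers_list : List String) (star : Int) : Int :=
  let st := answers_list.foldl pvAStep ([], [], 0, 0)
  let ga := st.1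
  let fa := st.2.1
  let asum := st.2.2.1
  let gsum := st.2.2.2
  let asum := if fa.length > 0 then asum + fa.length else asum
  let gsum := if ga.length > 0 then gsum + ga.length else gsum
  if star = 1 then asum else gsum

-- ===== PORT B =====
-- partition into maximal runs of non-empty lines (Source B's loop with its `current` accumulator)
def pvGroupsAux : List String → List String → List (List String)
  | [], current => if current = [] then [] else [current]
  | line :: rest, current =>
    if line.toList = [] then
      if current = [] then pvGroupsAux rest []
      else current :: pvGroupsAux rest []
    else pvGroupsAux rest (current ++ [line])

-- len(set("".join(g)))
def pvAnyCount (g : List String) : Int :=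
  ((PySem.Set.ofList ((g.map String.toList).flatten)).length : Int)

-- sum(1 for c in g[0] if all(c in l for l in g))
def pvAllCount (g : List String) : Int :=
  match g with
  | [] => 0
  | f :: _ => ((f.toList.filter (fun c => g.all (fun l => decide (c ∈ l.toList)))).length : Int)

def get_groups_answers_alt (answers_list : List String) (star : Int) : Int :=
  let groups := pvGroupsAux answers_list []
  let any_total := (groups.map pvAnyCount).sum
  let all_total := (groups.map pvAllCount).sum
  if star = 1 then any_total else all_total

-- ===== PRECONDITION & SPEC =====
def Spec_get_groups_answers (answers_list : List String) (star : Int) (out : Int) : Prop := out = get_groups_answers_alt answers_list star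
instance (answers_list : List String) (star : Int) (out : Int) : Decidable (Spec_get_groups_answers answers_list star out) := by unfold Spec_get_groups_answers; infer_instance

-- ===== CLAIM (what is proved, stated in full; the proofs are below) =====
def Claim_equal_get_groups_answers : Prop := ∀ (answers_list : List String) (star : Int), Dom_get_groups_answers answers_list star → Spec_get_groups_answers answers_list star (get_groups_answers answers_list star)

-- ===== LEMMAS AND PROOFS =====

-- characters of the current partial group, in order
def pvChars (cur : List String) : List Char := (cur.map String.toList).flatten

-- A's group_answers value for the current partial group
def pvInter : List String → List Char
  | [] => []
  | f :: rest => rest.foldl (fun acc l => acc.filter (fun c => decide (c ∈ l.toList))) f.toList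

-- A's `letter not in found_answers: append` loop is a set update
lemma pvFoldl_mem_append (xs : List Char) :
    ∀ s : List Char, xs.foldl (fun fa letter => if letter ∈ fa then fa else fa ++ [letter]) s
      = PySem.Set.update s xs := by
  induction xs with
  | nil => intro s; simp [PySem.Set.update]
  | cons x t ih =>
    intro s
    rw [List.foldl_cons, PySem.Set.update_cons]
    rw [ih]
    congr 1
    simp [PySem.Set.add, PySem.Set.contains]

-- sequential filtering = filtering by the conjunction
lemma pvFoldl_filter (ls : List String) :
    ∀ init : List Char,
      ls.foldl (fun acc l => acc.filter (fun c => decide (c ∈ l.toList))) init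
        = init.filter (fun c => ls.all (fun l => decide (c ∈ l.toList))) := by
  induction ls with
  | nil => intro init; simp
  | cons l t ih =>
    intro init
    rw [List.foldl_cons, ih, List.filter_filter]
    simp [Bool.and_comm]

lemma pvInter_eq_allFilter (f : String) (rest : List String) :
    pvInter (f :: rest) = f.toList.filter (fun c => (f :: rest).all (fun l => decide (c ∈ l.toList))) := by
  rw [pvInter, pvFoldl_filter]
  apply List.filter_congr
  intro c hc
  simp [hc]

lemma pvInter_length (g : List String) (hg : g ≠ []) :
    ((pvInter g).length : Int) = pvAllCount g := by
  cases g with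
  | nil => exact absurd rfl hg
  | cons f rest => rw [pvInter_eq_allFilter]; rfl

lemma pvInter_append (cur : List String) (line : String) (h : cur ≠ []) :
    pvInter (cur ++ [line]) = (pvInter cur).filter (fun c => decide (c ∈ line.toList)) := by
  cases cur with
  | nil => exact absurd rfl h
  | cons f rest => simp [pvInter, List.foldl_append]

-- the index?/pop? removal step removes the first occurrence
lemma pvPopStep (g : List Char) (p : Char) :
    (match PySem.List.index? g p with
      | some i =>
        match PySem.List.pop? g (Int.ofNat i) with
        | some pr => pr.2
        | none => g
      | none => g) = g.erase p := by
  by_cases hp : p ∈ g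
  · obtain ⟨k, hk⟩ : ∃ k, PySem.List.index? g p = some k := by
      have := (PySem.List.index?_isSome_iff (xs := g) (v := p)).2 hp
      exact Option.isSome_iff_exists.1 this
    obtain ⟨hlt, hval, _⟩ := PySem.List.getElem_of_index?_eq_some hk
    rw [hk]
    have hpop := PySem.List.pop?_natCast (xs := g) (n := k) hlt
    simp only [Int.ofNat_eq_natCast, hpop]
    have hidx : g.idxOf p = k := by
      have h' := hk
      rw [PySem.List.index?_eq_idxOf?] at h'
      rw [List.idxOf_eq_getD_idxOf?, h']
      rfl
    rw [← List.eraseIdx_idxOf_eq_erase, hidx]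
  · rw [(PySem.List.index?_eq_none_iff (xs := g) (v := p)).2 hp]
    exact (List.erase_of_not_mem hp).symm

lemma pvEraseFold_ne (c : Char) :
    ∀ (ps : List Char) (t : List Char), (∀ p ∈ ps, p ≠ c) →
      ps.foldl List.erase (c :: t) = c :: ps.foldl List.erase t := by
  intro ps
  induction ps with
  | nil => intro t _; rfl
  | cons p pt ih =>
    intro t h
    have hpc : p ≠ c := h p (by simp)
    rw [List.foldl_cons, List.foldl_cons, List.erase_cons_tail]
    · exact ih _ (fun q hq => h q (by simp [hq]))
    · simp only [beq_iff_eq]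
      exact Ne.symm hpc

lemma pvEraseFold (P : Char → Bool) :
    ∀ g : List Char, (g.filter (fun c => !P c)).foldl List.erase g = g.filter P := by
  intro g
  induction g with
  | nil => rfl
  | cons c t ih =>
    by_cases hPc : P c = true
    · have : (c :: t).filter (fun c => !P c) = t.filter (fun c => !P c) := by simp [hPc]
      rw [this, pvEraseFold_ne]
      · rw [ih]; simp [hPc]
      · intro p hp hpc
        subst hpc
        simp at hp
        simp [hPc] at hp
    · have hPc' : P c = false := by simpa using hPc
      have : (c :: t).filter (fun c => !P c) = c :: t.filter (fun c => !P c) := by simp [hPc']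
      rw [this, List.foldl_cons, List.erase_cons_head, ih]
      simp [hPc']

lemma pvChars_ne_nil (cur : List String) (hcur : cur ≠ []) (hne : ∀ l ∈ cur, l.toList ≠ []) :
    pvChars cur ≠ [] := by
  cases cur with
  | nil => exact absurd rfl hcur
  | cons f rest =>
    have hf := hne f (by simp)
    simp only [pvChars, List.map_cons, List.flatten_cons]
    intro h
    exact hf (List.append_eq_nil_iff.1 h).1

lemma pvSet_ne_nil (xs : List Char) (h : xs ≠ []) : PySem.Set.ofList xs ≠ [] := by
  cases xs with
  | nil => exact absurd rfl h
  | cons x t =>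
    have : x ∈ PySem.Set.ofList (x :: t) := (PySem.Set.mem_ofList _ _).2 (by simp)
    exact List.ne_nil_of_mem this

-- main loop invariant
lemma pvLoop (rest : List String) :
    ∀ (cur : List String) (asum gsum : Int), (∀ l ∈ cur, l.toList ≠ []) →
      (let st := rest.foldl pvAStep (pvInter cur, PySem.Set.ofList (pvChars cur), asum, gsum)
       st.2.2.1 + (st.2.1.length : Int) = asum + ((pvGroupsAux rest cur).map pvAnyCount).sum
       ∧ st.2.2.2 + (st.1.length : Int) = gsum + ((pvGroupsAux rest cur).map pvAllCount).sum) := by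
  induction rest with
  | nil =>
    intro cur asum gsum hne
    by_cases hc : cur = []
    · subst hc
      simp [pvGroupsAux, pvInter, pvChars, PySem.Set.ofList]
    · simp only [List.foldl_nil, pvGroupsAux, if_neg hc, List.map_cons, List.map_nil,
        List.sum_cons, List.sum_nil, add_zero]
      constructor
      · rfl
      · rw [pvInter_length cur hc]
  | cons line rest ih =>
    intro cur asum gsum hne
    by_cases hline : line.toList = []
    · -- empty line: flush the group
      have hstep : pvAStep (pvInter cur, PySem.Set.ofList (pvChars cur), asum, gsum) line
          = (pvInter [], PySem.Set.ofList (pvChars []),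
             asum + ((PySem.Set.ofList (pvChars cur)).length : Int),
             gsum + ((pvInter cur).length : Int)) := by
        simp [pvAStep, hline, pvInter, pvChars, PySem.Set.ofList, PySem.Set.empty]
      rw [List.foldl_cons, hstep]
      obtain ⟨hA, hB⟩ := ih [] (asum + ((PySem.Set.ofList (pvChars cur)).length : Int))
        (gsum + ((pvInter cur).length : Int)) (by simp)
      have hanyc : pvAnyCount cur = ((PySem.Set.ofList (pvChars cur)).length : Int) := rfl
      by_cases hc : cur = []
      · subst hc
        rw [show pvGroupsAux (line :: rest) ([] : List String) = pvGroupsAux rest [] from by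
          simp [pvGroupsAux, hline]]
        have hz1 : (PySem.Set.ofList (pvChars ([] : List String))).length = 0 := rfl
        have hz2 : (pvInter ([] : List String)).length = 0 := rfl
        exact ⟨by rw [hA, hz1]; push_cast; ring, by rw [hB, hz2]; push_cast; ring⟩
      · rw [show pvGroupsAux (line :: rest) cur = cur :: pvGroupsAux rest [] from by
          simp [pvGroupsAux, hline, hc]]
        simp only [List.map_cons, List.sum_cons]
        have hallc := pvInter_length cur hc
        exact ⟨by rw [hA, hanyc]; ring, by rw [hB, hallc]; ring⟩
    · -- non-empty line
      have hgroups : pvGroupsAux (line :: rest) cur = pvGroupsAux rest (cur ++ [line]) := by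
        simp [pvGroupsAux, hline]
      have hpopme : ∀ ga : List Char,
          ga.foldl (fun pm letter => if letter ∈ line.toList then pm else pm ++ [letter]) ([] : List Char)
            = ga.filter (fun c => !(decide (c ∈ line.toList))) := by
        intro ga
        have := PySem.List.foldl_append_if (l := ga) (acc := ([] : List Char))
          (p := fun c => !(decide (c ∈ line.toList))) (f := id)
        simp only [List.map_id, List.nil_append] at this
        rw [← this]
        apply PySem.List.foldl_congr_mem
        intro acc x _
        by_cases hx : x ∈ line.toList <;> simp [hx]
      have hpopfold : ∀ ga : List Char,
          (ga.filter (fun c => !(decide (c ∈ line.toList)))).foldl (fun g p =>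
            match PySem.List.index? g p with
            | some i =>
              match PySem.List.pop? g (Int.ofNat i) with
              | some pr => pr.2
              | none => g
            | none => g) ga = ga.filter (fun c => decide (c ∈ line.toList)) := by
        intro ga
        have hcong : (ga.filter (fun c => !(decide (c ∈ line.toList)))).foldl (fun g p =>
            match PySem.List.index? g p with
            | some i =>
              match PySem.List.pop? g (Int.ofNat i) with
              | some pr => pr.2
              | none => g
            | none => g) ga
            = (ga.filter (fun c => !(decide (c ∈ line.toList)))).foldl List.erase ga := by
          apply PySem.List.foldl_congr_mem
          intro acc x _
          exact pvPopStep acc x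
        rw [hcong, pvEraseFold (fun c => decide (c ∈ line.toList)) ga]
      by_cases hc : cur = []
      · -- start a new group
        subst hc
        have hstep : pvAStep (pvInter [], PySem.Set.ofList (pvChars []), asum, gsum) line
            = (pvInter [line], PySem.Set.ofList (pvChars [line]), asum, gsum) := by
          simp only [pvAStep, pvInter, pvChars, List.map_nil, List.flatten_nil, PySem.Set.ofList]
          rw [if_neg (by simpa using hline)]
          simp only [PySem.Set.empty, List.foldl_nil, List.length_nil, if_true]
          rw [pvFoldl_mem_append, hpopme, hpopfold]
          have hfilt : line.toList.filter (fun c => decide (c ∈ line.toList)) = line.toList :=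
            List.filter_eq_self.2 (fun c hc => by simpa using hc)
          rw [hfilt]
          simp [PySem.Set.update]
        rw [List.foldl_cons, hstep, hgroups]
        exact ih [line] asum gsum (by simpa using hline)
      · -- extend the current group
        have hfa : PySem.Set.ofList (pvChars cur) ≠ [] :=
          pvSet_ne_nil _ (pvChars_ne_nil cur hc hne)
        have hfalen : ¬ (PySem.Set.ofList (pvChars cur)).length = 0 := by
          simpa [List.length_eq_zero_iff] using hfa
        have hstep : pvAStep (pvInter cur, PySem.Set.ofList (pvChars cur), asum, gsum) line
            = (pvInter (cur ++ [line]), PySem.Set.ofList (pvChars (cur ++ [line])), asum, gsum) := by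
          simp only [pvAStep]
          rw [if_neg (by simpa using hline)]
          simp only [if_neg hfalen]
          rw [pvFoldl_mem_append, hpopme, hpopfold]
          rw [← pvInter_append cur line hc]
          have : pvChars (cur ++ [line]) = pvChars cur ++ line.toList := by
            simp [pvChars]
          rw [this, PySem.Set.ofList_append]
        rw [List.foldl_cons, hstep, hgroups]
        exact ih (cur ++ [line]) asum gsum (by
          intro l hl
          rcases List.mem_append.1 hl with h | h
          · exact hne l h
          · simp at h; subst h; exact hline)

-- ===== VERDICT (by name: the statement is the Claim_ definition above) =====
theorem get_groups_answers_spec : Claim_equal_get_groups_answers := by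
  intro answers_list star _
  unfold Spec_get_groups_answers get_groups_answers get_groups_answers_alt
  have h := pvLoop answers_list [] 0 0 (by simp)
  simp only [pvInter, pvChars, List.map_nil, List.flatten_nil, PySem.Set.ofList,
    PySem.Set.empty, List.foldl_nil] at h
  obtain ⟨h1, h2⟩ := h
  by_cases hstar : star = 1
  · simp only [if_pos hstar]
    split_ifs with hfa <;> omega
  · simp only [if_neg hstar]
    split_ifs with hga <;> omega
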